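-- pv_equiv track=rewrite | github.com/zhiqing0205/2024ExamSolutions | shopee/0429/3 - 购买最多的LOL英雄(贪心，排序).py | solution
-- ===== SOURCE A (Python) =====
-- def solution(costs, coins):
--     costs = sorted([(c, i) for i, c in enumerate(costs)])
--     selected = []
--     for c, i in costs:
--         if coins >= c:
--             coins -= c
--             selected.append((i, c))
--         else:
--             break
--
--     return [c for _, c in sorted(selected)]
-- ===== SOURCE B (Python) =====
-- def solution(costs, coins):
--     taken = set()
--     while True:
--         best = None  # (cost, index) of cheapest not-yet-taken hero, ties to smallest index
--         for i, c in enumerate(costs):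
--             if i not in taken and (best is None or c < best[0]):
--                 best = (c, i)
--         if best is None or coins < best[0]:
--             break
--         coins -= best[0]
--         taken.add(best[1])
--     return [c for i, c in enumerate(costs) if i in taken]
-- ===== Notes on version B (the rewrite author's own statement) =====
-- stated objective: alternative
-- what changed: B never sorts: it repeatedly scans for the cheapest not-yet-taken hero (ties to the smallest index) and buys it while affordable, then emits the answer by membership-filtering enumerate(costs) in original order, whereas A sorts (cost,index) pairs, takes a prefix, and sorts the selection again by index.
import Mathlib
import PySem

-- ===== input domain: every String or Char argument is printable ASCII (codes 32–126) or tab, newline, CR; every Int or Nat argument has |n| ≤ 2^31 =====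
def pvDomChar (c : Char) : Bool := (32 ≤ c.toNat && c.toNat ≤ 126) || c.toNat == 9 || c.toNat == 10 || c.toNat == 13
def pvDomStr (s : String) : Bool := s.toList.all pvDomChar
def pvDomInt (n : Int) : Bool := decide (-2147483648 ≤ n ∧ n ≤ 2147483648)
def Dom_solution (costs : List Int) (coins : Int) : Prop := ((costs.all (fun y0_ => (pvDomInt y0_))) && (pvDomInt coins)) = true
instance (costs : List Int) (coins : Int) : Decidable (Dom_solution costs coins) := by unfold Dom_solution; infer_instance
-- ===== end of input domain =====

-- B replaces A's sort-then-prefix greedy by repeated cheapest-untaken extraction (selection scans,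
-- no sorting anywhere) and emits the answer by filtering the original sequence (objective: alternative).

-- ===== PORT A =====
-- 'for c, i in costs: if coins >= c: … selected.append((i, c)) else: break'
def aLoop : List (Int × Int) → Int → List (Int × Int) → List (Int × Int)
  | [], _, sel => sel
  | p :: t, coins, sel => if coins ≥ p.1 then aLoop t (coins - p.1) (sel ++ [(p.2, p.1)]) else sel

def solution (costs : List Int) (coins : Int) : List Int :=
  -- costs = sorted([(c, i) for i, c in enumerate(costs)])  (tuple sort: lexicographic)
  let cs := PySem.List.sorted2 ((PySem.List.enumerate costs).map (fun p => (p.2, p.1))) (fun q => q.1) (fun q => q.2) false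
  let selected := aLoop cs coins []
  -- [c for _, c in sorted(selected)]
  (PySem.List.sorted2 selected (fun q => q.1) (fun q => q.2) false).map (fun q => q.2)

-- ===== PORT B =====
-- inner scan: 'for i, c in enumerate(costs): if i not in taken and (best is None or c < best[0]): best = (c, i)'
-- (best[0] is only evaluated when best is not None; '(best.getD (0,0)).1' is that same value there)
def bScan (costs : List Int) (taken : PySem.Set Int) : Option (Int × Int) :=
  (PySem.List.enumerate costs).foldl
    (fun best p =>
      if !(PySem.Set.contains taken p.1) && (best.isNone || decide (p.2 < (best.getD (0, 0)).1))
      then some (p.2, p.1) else best) none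

-- 'while True: best = scan; if best is None or coins < best[0]: break; coins -= best[0]; taken.add(best[1])'
-- fuel merely bounds the iteration count (each successful pass takes a NEW index, so at most
-- len(costs) passes act); it never changes the computed set.
def bLoop (costs : List Int) : Nat → Int → PySem.Set Int → PySem.Set Int
  | 0, _, taken => taken
  | fuel + 1, coins, taken =>
    match bScan costs taken with
    | none => taken
    | some b => if coins < b.1 then taken else bLoop costs fuel (coins - b.1) (PySem.Set.add taken b.2)

def solution_alt (costs : List Int) (coins : Int) : List Int :=
  let taken := bLoop costs costs.length coins PySem.Set.empty
  -- [c for i, c in enumerate(costs) if i in taken]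
  ((PySem.List.enumerate costs).filter (fun p => PySem.Set.contains taken p.1)).map (fun p => p.2)

-- ===== PRECONDITION & SPEC =====
def Spec_solution (costs : List Int) (coins : Int) (out : List Int) : Prop := out = solution_alt costs coins
instance (costs : List Int) (coins : Int) (out : List Int) : Decidable (Spec_solution costs coins out) := by unfold Spec_solution; infer_instance

-- ===== CLAIM (what is proved, stated in full; the proofs are below) =====
def Claim_equal_solution : Prop := ∀ (costs : List Int) (coins : Int), Dom_solution costs coins → Spec_solution costs coins (solution costs coins)

-- ===== LEMMAS AND PROOFS =====

-- the boolean lexicographic 'before' relation sorted2 uses (reverse = false)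
def blex (k1 k2 : Int × Int → Int) (a b : Int × Int) : Bool :=
  decide (k1 a < k1 b) || (!decide (k1 b < k1 a) && decide (k2 a < k2 b))

def LexLe (k1 k2 : Int × Int → Int) (a b : Int × Int) : Prop :=
  k1 a < k1 b ∨ (k1 a = k1 b ∧ k2 a ≤ k2 b)

def LexLt (k1 k2 : Int × Int → Int) (a b : Int × Int) : Prop :=
  k1 a < k1 b ∨ (k1 a = k1 b ∧ k2 a < k2 b)

lemma sorted2_eq_foldl (xs : List (Int × Int)) (k1 k2 : Int × Int → Int) :
    PySem.List.sorted2 xs k1 k2 false = xs.foldl (fun acc x => PySem.List.insertBy (blex k1 k2) x acc) [] := rfl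

lemma insertBy_blex_pairwise (k1 k2 : Int × Int → Int) (x : Int × Int) (ys : List (Int × Int))
    (h : ys.Pairwise (LexLe k1 k2)) :
    (PySem.List.insertBy (blex k1 k2) x ys).Pairwise (LexLe k1 k2) := by
  induction ys with
  | nil => simp [PySem.List.insertBy, LexLe]
  | cons y t ih =>
    rcases List.pairwise_cons.mp h with ⟨hy, ht⟩
    simp only [PySem.List.insertBy]
    split_ifs with hb
    · refine List.pairwise_cons.mpr ⟨?_, h⟩
      intro z hz
      have hxy : LexLe k1 k2 x y := by
        simp [blex] at hb
        unfold LexLe; omega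
      rcases List.mem_cons.mp hz with rfl | hz
      · exact hxy
      · have := hy z hz
        unfold LexLe at *; omega
    · refine List.pairwise_cons.mpr ⟨?_, ih ht⟩
      intro z hz
      rcases (PySem.List.insertBy_mem_iff (blex k1 k2) x z t).mp hz with rfl | hz
      · -- blex x y = false → LexLe y x
        simp [blex] at hb
        unfold LexLe; omega
      · exact hy z hz

lemma foldl_insertBy_blex_pairwise (k1 k2 : Int × Int → Int) (xs acc : List (Int × Int))
    (hacc : acc.Pairwise (LexLe k1 k2)) :
    (xs.foldl (fun acc x => PySem.List.insertBy (blex k1 k2) x acc) acc).Pairwise (LexLe k1 k2) := by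
  induction xs generalizing acc with
  | nil => exact hacc
  | cons x t ih => exact ih _ (insertBy_blex_pairwise k1 k2 x acc hacc)

lemma sorted2_pairwise_lexle (xs : List (Int × Int)) (k1 k2 : Int × Int → Int) :
    (PySem.List.sorted2 xs k1 k2 false).Pairwise (LexLe k1 k2) := by
  rw [sorted2_eq_foldl]
  exact foldl_insertBy_blex_pairwise k1 k2 xs [] (by simp)

-- uniqueness: any strictly lex-increasing rearrangement IS sorted2 (for jointly injective keys)
lemma sorted2_eq_of_perm_of_pairwise_lexlt (k1 k2 : Int × Int → Int)
    (hinj : ∀ a b : Int × Int, k1 a = k1 b → k2 a = k2 b → a = b)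
    (xs ys : List (Int × Int)) (hperm : ys.Perm xs) (hpw : ys.Pairwise (LexLt k1 k2)) :
    PySem.List.sorted2 xs k1 k2 false = ys := by
  refine List.eq_of_perm_of_sorted (le := LexLe k1 k2) ?_ (sorted2_pairwise_lexle xs k1 k2)
    (hpw.imp (by unfold LexLt LexLe; omega)) (((PySem.List.sorted2_perm xs k1 k2 false).trans hperm.symm))
  intro a b _ _ hab hba
  apply hinj a b
  · unfold LexLe at hab hba; omega
  · unfold LexLe at hab hba; omega

-- A's sorted order, in (index, cost) form
def sortedOrder (costs : List Int) : List (Int × Int) :=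
  PySem.List.sorted2 (PySem.List.enumerate costs) (fun p => p.2) (fun p => p.1) false

-- the greedy prefix A's loop consumes (pairs in (i, c) form)
def greedy : List (Int × Int) → Int → List (Int × Int)
  | [], _ => []
  | p :: t, coins => if coins < p.2 then [] else p :: greedy t (coins - p.2)

lemma aLoop_eq (l : List (Int × Int)) (coins : Int) (sel : List (Int × Int)) :
    aLoop (l.map (fun p => (p.2, p.1))) coins sel = sel ++ greedy l coins := by
  induction l generalizing coins sel with
  | nil => simp [aLoop, greedy]
  | cons p t ih =>
    simp only [List.map_cons, aLoop, greedy]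
    by_cases h : coins < p.2
    · rw [if_neg (by simpa using h), if_pos h]; simp
    · rw [if_pos (by simpa using h), if_neg h, ih]; simp

-- the reference greedy loop over the sorted order, accumulating chosen indices in a set
def oldLoop : List (Int × Int) → Int → PySem.Set Int → PySem.Set Int
  | [], _, s => s
  | p :: t, coins, s => if coins < p.2 then s else oldLoop t (coins - p.2) (PySem.Set.add s p.1)

lemma oldLoop_eq (l : List (Int × Int)) (coins : Int) (s : PySem.Set Int) :
    oldLoop l coins s = (greedy l coins).foldl (fun s p => PySem.Set.add s p.1) s := by
  induction l generalizing coins s with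
  | nil => simp [oldLoop, greedy]
  | cons p t ih =>
    simp only [oldLoop, greedy]
    by_cases h : coins < p.2
    · simp [h]
    · simp [h, ih]

lemma greedy_sublist (l : List (Int × Int)) (coins : Int) : (greedy l coins).Sublist l := by
  induction l generalizing coins with
  | nil => simp [greedy]
  | cons p t ih =>
    simp only [greedy]
    split_ifs
    · exact List.nil_sublist _
    · exact List.cons_sublist_cons.mpr (ih _)

-- the common middle form: filter the enumeration by membership in the greedily chosen index set
def mid (costs : List Int) (coins : Int) : List Int :=
  ((PySem.List.enumerate costs).filter
    (fun p => PySem.Set.contains (oldLoop (sortedOrder costs) coins PySem.Set.empty) p.1)).map (fun p => p.2)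

-- ---------- A = mid (A's second sort of the chosen pairs is the membership filter) ----------
lemma solution_eq_mid (costs : List Int) (coins : Int) :
    solution costs coins = mid costs coins := by
  unfold solution mid sortedOrder
  dsimp only
  set E := PySem.List.enumerate costs with hE
  set order := PySem.List.sorted2 E (fun p => p.2) (fun p => p.1) false with horder
  have hop : order.Perm E := PySem.List.sorted2_perm E _ _ false
  have hElt : E.Pairwise (fun p q : Int × Int => p.1 < q.1) := PySem.List.pairwise_lt_enumerate costs 0
  have hone : order.Pairwise (fun p q : Int × Int => p.1 ≠ q.1) := by
    refine (List.Perm.pairwise_iff (fun h => h.symm) hop).mpr (hElt.imp ?_)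
    intro a b h; omega
  have h1 : PySem.List.sorted2 (E.map (fun p => (p.2, p.1))) (fun q => q.1) (fun q => q.2) false
      = order.map (fun p => (p.2, p.1)) := by
    apply sorted2_eq_of_perm_of_pairwise_lexlt
    · intro a b h1 h2; exact Prod.ext h1 h2
    · exact hop.map _
    · have hle : order.Pairwise (LexLe (fun p => p.2) (fun p => p.1)) :=
        sorted2_pairwise_lexle E _ _
      have := hle.and hone
      refine List.pairwise_map.mpr (this.imp ?_)
      intro a b h
      unfold LexLe at h; unfold LexLt; dsimp at *; omega
  rw [h1, aLoop_eq, oldLoop_eq]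
  simp only [List.nil_append]
  set T := greedy order coins with hT
  have hTsub : T.Sublist order := greedy_sublist order coins
  have hTmem : ∀ p ∈ T, p ∈ E := fun p hp => hop.mem_iff.mp (hTsub.mem hp)
  have hchosen : ∀ i : Int,
      PySem.Set.contains (T.foldl (fun s p => PySem.Set.add s p.1) PySem.Set.empty) i
        = decide (i ∈ T.map (fun p => p.1)) := by
    intro i
    have : T.foldl (fun s p => PySem.Set.add s p.1) PySem.Set.empty
        = PySem.Set.ofList (T.map (fun p => p.1)) := by
      rw [PySem.Set.ofList_eq_foldl, List.foldl_map]
      rfl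
    rw [this]
    simp [PySem.Set.contains, PySem.Set.mem_ofList]
  have hTnods : (T.map (fun p => p.1)).Nodup := by
    have hOnod : (order.map (fun p => p.1)).Nodup := by
      simpa [List.Nodup, List.pairwise_map] using hone
    exact (hTsub.map _).nodup hOnod
  have hEnod : E.Nodup := by
    refine hElt.imp ?_
    intro a b h hc
    rw [hc] at h; omega
  have h2 : PySem.List.sorted2 T (fun q => q.1) (fun q => q.2) false
      = E.filter (fun p => decide (p.1 ∈ T.map (fun p => p.1))) := by
    apply sorted2_eq_of_perm_of_pairwise_lexlt
    · intro a b ha hb; exact Prod.ext ha hb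
    · refine (List.perm_ext_iff_of_nodup (hEnod.filter _) (hTsub.nodup (hop.nodup_iff.mpr hEnod))).mpr ?_
      intro p
      simp only [List.mem_filter, decide_eq_true_iff, List.mem_map]
      constructor
      · rintro ⟨hpE, q, hqT, hq1⟩
        have hqE := hTmem q hqT
        rcases (PySem.List.mem_enumerate_iff _ _ _).mp hpE with ⟨k, hk, rfl⟩
        rcases (PySem.List.mem_enumerate_iff _ _ _).mp hqE with ⟨m, hm, rfl⟩
        simp only at hq1
        have : m = k := by omega
        subst this
        exact hqT
      · intro hpT
        exact ⟨hTmem p hpT, p, hpT, rfl⟩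
    · refine ((hElt.filter _).imp ?_)
      intro a b h
      unfold LexLt; dsimp only; omega
  rw [h2]
  congr 1
  apply List.filter_congr
  intro p _
  rw [hchosen]

-- ---------- B = mid (the repeated min-scan walks the sorted order) ----------

-- B's inner scan without the 'taken' test, over the untaken sublist
def minFold (U : List (Int × Int)) (b : Option (Int × Int)) : Option (Int × Int) :=
  U.foldl (fun best p =>
    if best.isNone || decide (p.2 < (best.getD (0, 0)).1) then some (p.2, p.1) else best) b

lemma bScan_eq_minFold (costs : List Int) (taken : PySem.Set Int) :
    bScan costs taken
      = minFold ((PySem.List.enumerate costs).filter (fun p => !(PySem.Set.contains taken p.1))) none := by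
  unfold bScan minFold
  generalize (PySem.List.enumerate costs) = l
  generalize (none : Option (Int × Int)) = b
  induction l generalizing b with
  | nil => rfl
  | cons p t ih =>
    rw [List.foldl_cons, List.filter_cons]
    by_cases h : PySem.Set.contains taken p.1
    · rw [h]
      simp only [Bool.not_true, Bool.false_and, Bool.false_eq_true, if_false]
      exact ih b
    · have h' : PySem.Set.contains taken p.1 = false := by simpa using h
      rw [h']
      simp only [Bool.not_false, Bool.true_and]
      exact ih _

-- what the scan computes: the (cost, index)-lexicographic minimum, ties to the first (= smallest index)
lemma minFold_go (U : List (Int × Int)) (b : Option (Int × Int))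
    (hU : U.Pairwise (fun p q : Int × Int => p.1 < q.1))
    (hb : ∀ c i, b = some (c, i) → ∀ q ∈ U, i < q.1) :
    (U = [] ∧ minFold U b = b) ∨
    ∃ c i, minFold U b = some (c, i) ∧ ((i, c) ∈ U ∨ b = some (c, i)) ∧
      (∀ q ∈ U, c < q.2 ∨ (c = q.2 ∧ i ≤ q.1)) ∧
      (∀ c' i', b = some (c', i') → (c < c' ∨ (c = c' ∧ i ≤ i'))) := by
  induction U generalizing b with
  | nil => exact Or.inl ⟨rfl, rfl⟩
  | cons p t ih =>
    rcases List.pairwise_cons.mp hU with ⟨hp, ht⟩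
    by_cases hcond : (b.isNone || decide (p.2 < (b.getD (0, 0)).1)) = true
    · -- best = (p.2, p.1) now
      have hstep : minFold (p :: t) b = minFold t (some (p.2, p.1)) := by
        unfold minFold
        rw [List.foldl_cons, if_pos hcond]
      have hb' : ∀ c i, (some (p.2, p.1) : Option (Int × Int)) = some (c, i) → ∀ q ∈ t, i < q.1 := by
        rintro c i h q hq
        injection h with h; injection h with h1 h2
        subst h1; subst h2
        exact hp q hq
      rcases ih (some (p.2, p.1)) ht hb' with ⟨hte, hres⟩ | ⟨c, i, hres, hmem, hmin, hbmin⟩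
      · subst hte
        refine Or.inr ⟨p.2, p.1, by rw [hstep]; exact hres, Or.inl (by simp), ?_, ?_⟩
        · intro q hq
          rcases List.mem_cons.mp hq with rfl | hq
          · omega
          · simp at hq
        · rintro c' i' rfl
          simp only [Option.isNone_some, Bool.false_or, decide_eq_true_eq, Option.getD_some] at hcond
          omega
      · refine Or.inr ⟨c, i, by rw [hstep]; exact hres, ?_, ?_, ?_⟩
        · rcases hmem with hm | hm
          · exact Or.inl (List.mem_cons_of_mem _ hm)
          · injection hm with hm; injection hm with h1 h2
            exact Or.inl (by simp [← h1, ← h2])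
        · intro q hq
          rcases List.mem_cons.mp hq with hqp | hq
          · have := hbmin p.2 p.1 rfl
            rw [hqp]
            omega
          · exact hmin q hq
        · rintro c'' i'' hbe
          subst hbe
          have h1 := hbmin p.2 p.1 rfl
          simp only [Option.isNone_some, Bool.false_or, decide_eq_true_eq, Option.getD_some] at hcond
          omega
    · -- keep b; b must be some with b.cost ≤ p.2
      rcases hob : b with _ | ⟨c', i'⟩
      · subst hob; simp at hcond
      subst hob
      have hstep : minFold (p :: t) (some (c', i')) = minFold t (some (c', i')) := by
        unfold minFold
        rw [List.foldl_cons, if_neg hcond]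
      have hlt : ¬ p.2 < c' := by simpa using hcond
      have hip : i' < p.1 := hb c' i' rfl p (List.mem_cons_self ..)
      have hb' : ∀ c i, (some (c', i') : Option (Int × Int)) = some (c, i) → ∀ q ∈ t, i < q.1 := by
        intro c i h q hq
        injection h with h; injection h with h1 h2
        rw [← h2]
        exact hb c' i' rfl q (List.mem_cons_of_mem _ hq)
      rcases ih (some (c', i')) ht hb' with ⟨hte, hres⟩ | ⟨c, i, hres, hmem, hmin, hbmin⟩
      · subst hte
        refine Or.inr ⟨c', i', by rw [hstep]; exact hres, Or.inr rfl, ?_, ?_⟩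
        · intro q hq
          rcases List.mem_cons.mp hq with rfl | hq
          · omega
          · simp at hq
        · intro a b' h
          injection h with h
          injection h with h1 h2
          subst h1; subst h2
          omega
      · refine Or.inr ⟨c, i, by rw [hstep]; exact hres, ?_, ?_, hbmin⟩
        · rcases hmem with hm | hm
          · exact Or.inl (List.mem_cons_of_mem _ hm)
          · exact Or.inr hm
        · intro q hq
          rcases List.mem_cons.mp hq with hqp | hq
          · have := hbmin c' i' rfl
            rw [hqp]
            omega
          · exact hmin q hq

-- facts about the sorted order
lemma sortedOrder_perm (costs : List Int) : (sortedOrder costs).Perm (PySem.List.enumerate costs) :=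
  PySem.List.sorted2_perm _ _ _ false

lemma sortedOrder_fst_ne (costs : List Int) :
    (sortedOrder costs).Pairwise (fun p q : Int × Int => p.1 ≠ q.1) := by
  refine (List.Perm.pairwise_iff (fun h => h.symm) (sortedOrder_perm costs)).mpr ?_
  refine (PySem.List.pairwise_lt_enumerate costs 0).imp ?_
  intro a b h; omega

lemma sortedOrder_pairwise_lt (costs : List Int) :
    (sortedOrder costs).Pairwise (fun p q : Int × Int => p.2 < q.2 ∨ (p.2 = q.2 ∧ p.1 < q.1)) := by
  have hle : (sortedOrder costs).Pairwise (LexLe (fun p => p.2) (fun p => p.1)) :=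
    sorted2_pairwise_lexle _ _ _
  refine (hle.and (sortedOrder_fst_ne costs)).imp ?_
  intro a b h
  obtain ⟨h1, h2⟩ := h
  unfold LexLe at h1
  dsimp only at h1
  omega

-- membership in B's untaken sublist, under the loop invariant
lemma untaken_mem (costs : List Int) (taken : PySem.Set Int) (done rest : List (Int × Int))
    (horder : sortedOrder costs = done ++ rest)
    (htk : ∀ i, PySem.Set.contains taken i = decide (i ∈ done.map Prod.fst)) :
    ∀ p, p ∈ (PySem.List.enumerate costs).filter (fun p => !(PySem.Set.contains taken p.1)) ↔ p ∈ rest := by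
  intro p
  have hperm := sortedOrder_perm costs
  have hsplit := List.pairwise_append.mp (by rw [← horder]; exact sortedOrder_fst_ne costs)
  rw [List.mem_filter]
  constructor
  · rintro ⟨hpE, hnt⟩
    have hpo : p ∈ done ++ rest := by rw [← horder]; exact hperm.mem_iff.mpr hpE
    have hnd : p.1 ∉ done.map Prod.fst := by
      intro hmem
      rw [htk p.1] at hnt
      simp [hmem] at hnt
    rcases List.mem_append.mp hpo with hd | hr
    · exact absurd (List.mem_map_of_mem hd) hnd
    · exact hr
  · intro hr
    have hpo : p ∈ sortedOrder costs := by rw [horder]; exact List.mem_append.mpr (Or.inr hr)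
    refine ⟨hperm.mem_iff.mp hpo, ?_⟩
    rw [htk p.1]
    simp only [Bool.not_eq_eq_eq_not, Bool.not_true, decide_eq_false_iff_not]
    intro hmem
    rcases List.mem_map.mp hmem with ⟨q, hq, hq1⟩
    exact hsplit.2.2 q hq p hr hq1

lemma bScan_none (costs : List Int) (taken : PySem.Set Int) (done : List (Int × Int))
    (horder : sortedOrder costs = done)
    (htk : ∀ i, PySem.Set.contains taken i = decide (i ∈ done.map Prod.fst)) :
    bScan costs taken = none := by
  rw [bScan_eq_minFold]
  have hU : (PySem.List.enumerate costs).filter (fun p => !(PySem.Set.contains taken p.1)) = [] := by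
    have hmem := untaken_mem costs taken done [] (by simpa using horder) htk
    rw [List.eq_nil_iff_forall_not_mem]
    intro p hp
    simpa using (hmem p).mp hp
  rw [hU]
  rfl

lemma bScan_some (costs : List Int) (taken : PySem.Set Int) (done rest : List (Int × Int)) (r : Int × Int)
    (horder : sortedOrder costs = done ++ r :: rest)
    (htk : ∀ i, PySem.Set.contains taken i = decide (i ∈ done.map Prod.fst)) :
    bScan costs taken = some (r.2, r.1) := by
  rw [bScan_eq_minFold]
  set U := (PySem.List.enumerate costs).filter (fun p => !(PySem.Set.contains taken p.1)) with hUdef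
  have hUmem := untaken_mem costs taken done (r :: rest) horder htk
  have hUpw : U.Pairwise (fun p q : Int × Int => p.1 < q.1) :=
    (PySem.List.pairwise_lt_enumerate costs 0).filter _
  rcases minFold_go U none hUpw (by intro c i h; exact absurd h (by simp)) with
    ⟨hUe, _⟩ | ⟨c, i, hres, hmem, hmin, _⟩
  · exfalso
    have : r ∈ U := (hUmem r).mpr (List.mem_cons_self ..)
    rw [hUe] at this
    simp at this
  · rw [hres]
    have hicU : (i, c) ∈ U := by
      rcases hmem with hm | hm
      · exact hm
      · exact absurd hm (by simp)
    have hicR : (i, c) ∈ r :: rest := (hUmem _).mp hicU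
    have hminr := hmin r ((hUmem r).mpr (List.mem_cons_self ..))
    have hRpw : (r :: rest).Pairwise (fun p q : Int × Int => p.2 < q.2 ∨ (p.2 = q.2 ∧ p.1 < q.1)) := by
      refine List.Pairwise.sublist ?_ (sortedOrder_pairwise_lt costs)
      rw [horder]
      exact List.sublist_append_right ..
    rcases List.mem_cons.mp hicR with he | hr'
    · rw [← he]
    · have := (List.pairwise_cons.mp hRpw).1 (i, c) hr'
      simp only at this hminr
      exfalso
      omega

-- B's while-loop walks the untaken remainder of the sorted order exactly like the reference greedy loop
lemma loop_inv (costs : List Int) (rest : List (Int × Int)) :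
    ∀ (done : List (Int × Int)) (fuel : Nat) (coins : Int) (taken : PySem.Set Int),
    sortedOrder costs = done ++ rest →
    (∀ i, PySem.Set.contains taken i = decide (i ∈ done.map Prod.fst)) →
    rest.length ≤ fuel →
    bLoop costs fuel coins taken = oldLoop rest coins taken := by
  induction rest with
  | nil =>
    intro done fuel coins taken horder htk _
    have hs := bScan_none costs taken done (by simpa using horder) htk
    cases fuel with
    | zero => rfl
    | succ f => simp [bLoop, hs, oldLoop]
  | cons r rest' ih =>
    intro done fuel coins taken horder htk hfuel
    cases fuel with
    | zero => simp at hfuel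
    | succ f =>
      have hs := bScan_some costs taken done rest' r horder htk
      by_cases hc : coins < r.2
      · simp [bLoop, hs, oldLoop, hc]
      · simp only [bLoop, hs, oldLoop, if_neg hc]
        refine ih (done ++ [r]) f (coins - r.2) (PySem.Set.add taken r.1) ?_ ?_ ?_
        · rw [horder]; simp
        · intro i
          have hLR : PySem.Set.contains (PySem.Set.add taken r.1) i = true ↔
              (i ∈ done.map Prod.fst ∨ i = r.1) := by
            rw [PySem.Set.contains_iff, PySem.Set.mem_add]
            have h2 : i ∈ taken ↔ i ∈ done.map Prod.fst := by
              rw [← PySem.Set.contains_iff, htk i]; simp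
            rw [h2]
          rw [Bool.eq_iff_iff, hLR]
          simp
        · simpa using Nat.le_of_succ_le_succ (by simpa using hfuel)

lemma alt_eq_mid (costs : List Int) (coins : Int) :
    solution_alt costs coins = mid costs coins := by
  unfold solution_alt mid
  dsimp only
  have hlen : (sortedOrder costs).length ≤ costs.length := by
    rw [(sortedOrder_perm costs).length_eq, PySem.List.length_enumerate]
  rw [loop_inv costs (sortedOrder costs) [] costs.length coins PySem.Set.empty (by simp) (by intro i; rfl) hlen]

-- ===== VERDICT (by name: the statement is the Claim_ definition above) =====
theorem solution_spec : Claim_equal_solution := by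
  intro costs coins _
  unfold Spec_solution
  rw [solution_eq_mid, alt_eq_mid]
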